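-- pv_equiv track=rewrite | github.com/shoplikov/news_ner | generate_labels.py | convert_chunks_to_conll
-- ===== SOURCE A (Python) =====
-- from typing import List, Dict, Optional, Tuple
--
-- def find_all_occurrences(text: str, chunk: str) -> List[Tuple[int, int]]:
--     """Find all occurrences of a chunk in the text with their positions."""
--     positions = []
--     start = 0
--     while True:
--         pos = text.find(chunk, start)
--         if pos == -1:
--             break
--         positions.append((pos, pos + len(chunk)))
--         start = pos + 1
--     return positions
--
-- def convert_chunks_to_conll(text: str, labeled_chunks: Dict[str, List[str]]) -> List[tuple]:
--     """
--     Convert text and labeled chunks to CoNLL format (token, label).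
--
--     Args:
--         text: Original text
--         labeled_chunks: Dictionary with label types as keys and lists of text chunks as values
--
--     Returns:
--         List of (token, label) tuples in BIO format
--     """
--     # Tokenize text
--     tokens = text.split()
--
--     # Create character to token mapping
--     char_to_token = {}
--     char_pos = 0
--     for idx, token in enumerate(tokens):
--         start = text.find(token, char_pos)
--         if start != -1:
--             for i in range(start, start + len(token)):
--                 char_to_token[i] = idx
--             char_pos = start + len(token)
--
--     # Initialize all tokens as 'O' (Outside)
--     labels = ['O'] * len(tokens)
--
--     # Process each label type and its chunks
--     for label, chunks in labeled_chunks.items():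
--         for chunk in chunks:
--             # Find all occurrences of this chunk in the text
--             occurrences = find_all_occurrences(text, chunk)
--
--             for start_char, end_char in occurrences:
--                 # Find which tokens this chunk spans
--                 token_indices = set()
--                 for char_idx in range(start_char, end_char):
--                     if char_idx in char_to_token:
--                         token_indices.add(char_to_token[char_idx])
--
--                 token_indices = sorted(token_indices)
--
--                 # Apply BIO tagging (only if not already labeled to avoid conflicts)
--                 if token_indices and labels[token_indices[0]] == 'O':
--                     labels[token_indices[0]] = f'B-{label}'
--                     for idx in token_indices[1:]:
--                         if labels[idx] == 'O':
--                             labels[idx] = f'I-{label}'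
--
--     token_labels = list(zip(tokens, labels))
--     return token_labels
-- ===== SOURCE B (Python) =====
-- from typing import List, Dict, Tuple
--
-- def convert_chunks_to_conll(text: str, labeled_chunks: Dict[str, List[str]]) -> List[tuple]:
--     """Interval-overlap reformulation: token (start, end) spans are computed once;
--     each chunk occurrence selects the covered tokens by span overlap instead of
--     scanning every character through a char->token dictionary."""
--     tokens = text.split()
--
--     # Token character spans, derived by the same advancing find.
--     spans = []
--     char_pos = 0
--     for token in tokens:
--         start = text.find(token, char_pos)
--         if start == -1:
--             spans.append((-1, -1))  # not found: this span overlaps nothing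
--         else:
--             spans.append((start, start + len(token)))
--             char_pos = start + len(token)
--
--     labels = ['O'] * len(tokens)
--
--     for label, chunks in labeled_chunks.items():
--         for chunk in chunks:
--             pos = text.find(chunk)
--             while pos != -1:
--                 end = pos + len(chunk)
--                 covered = [i for i, (s, e) in enumerate(spans)
--                            if max(s, pos) < min(e, end)]
--                 if covered and labels[covered[0]] == 'O':
--                     labels[covered[0]] = 'B-' + label
--                     for i in covered[1:]:
--                         if labels[i] == 'O':
--                             labels[i] = 'I-' + label
--                 pos = text.find(chunk, pos + 1)
--
--     return list(zip(tokens, labels))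
-- ===== Notes on version B (the rewrite author's own statement) =====
-- stated objective: alternative
-- what changed: B replaces A's per-character char->token dictionary (built index by index and scanned character by character for every chunk occurrence) with a once-computed list of token (start,end) spans, selecting the tokens covered by each occurrence via interval overlap; the BIO tagging itself is unchanged.
import Mathlib
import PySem

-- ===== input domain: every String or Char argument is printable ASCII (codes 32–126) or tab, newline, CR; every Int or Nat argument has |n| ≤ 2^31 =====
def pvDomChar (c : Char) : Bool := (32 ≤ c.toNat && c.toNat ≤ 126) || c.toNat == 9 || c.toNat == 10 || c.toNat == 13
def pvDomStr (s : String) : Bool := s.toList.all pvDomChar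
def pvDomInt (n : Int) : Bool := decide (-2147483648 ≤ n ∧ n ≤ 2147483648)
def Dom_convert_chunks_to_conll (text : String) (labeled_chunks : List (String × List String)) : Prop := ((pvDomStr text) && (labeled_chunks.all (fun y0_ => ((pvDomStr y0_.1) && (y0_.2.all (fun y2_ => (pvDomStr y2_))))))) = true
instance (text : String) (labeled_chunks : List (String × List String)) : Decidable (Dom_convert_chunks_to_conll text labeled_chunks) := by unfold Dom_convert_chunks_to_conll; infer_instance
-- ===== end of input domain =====

-- B replaces A's per-character char->token dictionary by a list of token (start, end)
-- spans and selects the tokens covered by each chunk occurrence via interval overlap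
-- (objective: alternative decomposition; the BIO tagging itself is unchanged).

-- Facts about Python's str.find(sub, start) needed for the termination of the
-- occurrence-scanning loops of both ports (cited in their decreasing_by).
theorem pvFindFrom_le_length (s sub : List Char) (k : Nat) :
    PySem.Chars.findFrom s sub (k : Int) none ≤ s.length := by
  have hf := PySem.Chars.find_le_length (List.drop k (List.take s.length s)) sub
  simp only [PySem.Chars.findFrom]
  have h1 : ¬ ((k : Int) < 0) := by omega
  simp only [if_neg h1]
  split_ifs with h2 h3
  · omega
  · omega
  · rw [List.length_drop, List.length_take] at hf
    simp only [Int.toNat_natCast] at *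
    omega

theorem pvFindFrom_neg_one_of_gt (s sub : List Char) (k : Nat) (h : s.length < k) :
    PySem.Chars.findFrom s sub (k : Int) none = -1 := by
  simp only [PySem.Chars.findFrom]
  have h1 : ¬ ((k : Int) < 0) := by omega
  have h2 : (s.length : Int) < (k : Int) := by exact_mod_cast h
  simp only [if_neg h1]
  rw [if_pos h2]

theorem pvFindFrom_facts (s sub : List Char) (k : Nat)
    (h : PySem.Chars.findFrom s sub (k : Int) none ≠ -1) :
    k ≤ s.length ∧ (k : Int) ≤ PySem.Chars.findFrom s sub (k : Int) none ∧
      PySem.Chars.findFrom s sub (k : Int) none + sub.length ≤ s.length := by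
  have hk : k ≤ s.length := by
    by_contra hk
    exact h (pvFindFrom_neg_one_of_gt s sub k (by omega))
  obtain ⟨h1, h2, -⟩ := PySem.Chars.findFrom_natCast_spec s sub k hk h
  refine ⟨hk, h1, ?_⟩
  have hlen : sub.length ≤ (s.drop (PySem.Chars.findFrom s sub (k:Int) none).toNat).length :=
    h2.length_le
  rw [List.length_drop] at hlen
  have h0 : 0 ≤ PySem.Chars.findFrom s sub (k : Int) none :=
    le_trans (Int.natCast_nonneg k) h1
  have h4 := pvFindFrom_le_length s sub k
  have := Int.toNat_of_nonneg h0
  omega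

-- ===== PORT A =====

-- A's find_all_occurrences: the while-True / text.find(chunk, start) loop.
def pvFindAllOccAux (t c : List Char) (start : Nat) : List (Int × Int) :=
  let pos := PySem.Chars.findFrom t c (start : Int) none
  if h : pos = -1 then []
  else (pos, pos + (c.length : Int)) :: pvFindAllOccAux t c (pos.toNat + 1)
termination_by t.length + 1 - start
decreasing_by
  obtain ⟨h1, h2, h3⟩ := pvFindFrom_facts t c start h
  omega

def find_all_occurrences (text chunk : String) : List (Int × Int) :=
  pvFindAllOccAux text.toList chunk.toList 0

-- one step of A's char_to_token building loop (state: the dict and char_pos)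
def pvCharMapStep (t : List Char) (st : PySem.Dict Int Int × Int) (p : Int × List Char) :
    PySem.Dict Int Int × Int :=
  let start := PySem.Chars.findFrom t p.2 st.2 none
  if start ≠ -1 then
    ((PySem.List.pyRange start (start + (p.2.length : Int)) 1).foldl
        (fun d i => d.insert i p.1) st.1,
      start + (p.2.length : Int))
  else st

-- A's token_indices for one occurrence: scan each character index into the dict,
-- collect the distinct token indices, sort them.
def pvTokenIndices (d : PySem.Dict Int Int) (sc ec : Int) : List Int :=
  PySem.List.sorted
    ((PySem.List.pyRange sc ec 1).foldl
      (fun s c => if d.contains c then PySem.Set.add s (d.getD c 0) else s) PySem.Set.empty)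
    (fun x => x)

-- the BIO tagging over one (sorted) index list — textually identical in A and B
def pvApplyBIO (label : String) (labels : List String) (tis : List Int) : List String :=
  match tis with
  | [] => labels
  | i0 :: rest =>
    if PySem.List.pyGetD labels i0 "O" = "O" then
      rest.foldl
        (fun ls i => if PySem.List.pyGetD ls i "O" = "O" then PySem.List.pySetD ls i ("I-" ++ label) else ls)
        (PySem.List.pySetD labels i0 ("B-" ++ label))
    else labels

def convert_chunks_to_conll (text : String) (labeled_chunks : List (String × List String)) :
    List (String × String) :=
  let t := text.toList
  let tokens := PySem.Chars.split₀ t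
  let char_to_token := ((PySem.List.enumerate tokens 0).foldl (pvCharMapStep t) (PySem.Dict.empty, 0)).1
  let init := List.replicate tokens.length "O"
  let labels := (PySem.Dict.ofList labeled_chunks).items.foldl (fun labels lc =>
    lc.2.foldl (fun labels chunk =>
      (find_all_occurrences text chunk).foldl (fun labels occ =>
        pvApplyBIO lc.1 labels (pvTokenIndices char_to_token occ.1 occ.2)) labels) labels) init
  List.zip (tokens.map String.ofList) labels

-- ===== PORT B =====

-- one step of B's span-building loop (state: the span list and char_pos)
def pvSpanStep (t : List Char) (st : List (Int × Int) × Int) (token : List Char) :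
    List (Int × Int) × Int :=
  let start := PySem.Chars.findFrom t token st.2 none
  if start = -1 then (st.1 ++ [(-1, -1)], st.2)
  else (st.1 ++ [(start, start + (token.length : Int))], start + (token.length : Int))

-- B's covered tokens for one occurrence: interval overlap with every token span
def pvCovered (spans : List (Int × Int)) (pos endc : Int) : List Int :=
  ((PySem.List.enumerate spans 0).filter (fun p => max p.2.1 pos < min p.2.2 endc)).map (·.1)

-- B's while loop over the occurrences of one chunk, tagging as it goes
def pvTagOccs (t c : List Char) (spans : List (Int × Int)) (label : String)
    (labels : List String) (start : Nat) : List String :=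
  let pos := PySem.Chars.findFrom t c (start : Int) none
  if h : pos = -1 then labels
  else pvTagOccs t c spans label
    (pvApplyBIO label labels (pvCovered spans pos (pos + (c.length : Int)))) (pos.toNat + 1)
termination_by t.length + 1 - start
decreasing_by
  obtain ⟨h1, h2, h3⟩ := pvFindFrom_facts t c start h
  omega

def convert_chunks_to_conll_alt (text : String) (labeled_chunks : List (String × List String)) :
    List (String × String) :=
  let t := text.toList
  let tokens := PySem.Chars.split₀ t
  let spans := (tokens.foldl (pvSpanStep t) ([], 0)).1
  let init := List.replicate tokens.length "O"
  let labels := (PySem.Dict.ofList labeled_chunks).items.foldl (fun labels lc =>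
    lc.2.foldl (fun labels chunk => pvTagOccs t chunk.toList spans lc.1 labels 0) labels) init
  List.zip (tokens.map String.ofList) labels

-- ===== PRECONDITION & SPEC =====
def Spec_convert_chunks_to_conll (text : String) (labeled_chunks : List (String × List String)) (out : List (String × String)) : Prop := out = convert_chunks_to_conll_alt text labeled_chunks
instance (text : String) (labeled_chunks : List (String × List String)) (out : List (String × String)) : Decidable (Spec_convert_chunks_to_conll text labeled_chunks out) := by unfold Spec_convert_chunks_to_conll; infer_instance

-- ===== CLAIM (what is proved, stated in full; the proofs are below) =====
def Claim_equal_convert_chunks_to_conll : Prop := ∀ (text : String) (labeled_chunks : List (String × List String)), Dom_convert_chunks_to_conll text labeled_chunks → Spec_convert_chunks_to_conll text labeled_chunks (convert_chunks_to_conll text labeled_chunks)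

-- ===== LEMMAS AND PROOFS =====

-- membership in A's per-occurrence index set
theorem pvMemSetFold (d : PySem.Dict Int Int) (rng : List Int) (s0 : PySem.Set Int) (i : Int) :
    i ∈ rng.foldl (fun s c => if d.contains c then PySem.Set.add s (d.getD c 0) else s) s0 ↔
      i ∈ s0 ∨ ∃ c ∈ rng, d.contains c = true ∧ d.getD c 0 = i := by
  induction rng generalizing s0 with
  | nil => simp
  | cons c rng ih =>
    simp only [List.foldl_cons, List.mem_cons]
    by_cases hc : d.contains c = true
    · rw [if_pos hc, ih, PySem.Set.mem_add]
      constructor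
      · rintro ((h | h) | ⟨x, hx, h1, h2⟩)
        · exact Or.inl h
        · exact Or.inr ⟨c, Or.inl rfl, hc, h.symm⟩
        · exact Or.inr ⟨x, Or.inr hx, h1, h2⟩
      · rintro (h | ⟨x, (rfl | hx), h1, h2⟩)
        · exact Or.inl (Or.inl h)
        · exact Or.inl (Or.inr h2.symm)
        · exact Or.inr ⟨x, hx, h1, h2⟩
    · rw [if_neg hc, ih]
      constructor
      · rintro (h | ⟨x, hx, h1, h2⟩)
        · exact Or.inl h
        · exact Or.inr ⟨x, Or.inr hx, h1, h2⟩
      · rintro (h | ⟨x, (rfl | hx), h1, h2⟩)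
        · exact Or.inl h
        · exact absurd h1 hc
        · exact Or.inr ⟨x, hx, h1, h2⟩

theorem pvNodupSetFold (d : PySem.Dict Int Int) (rng : List Int) (s0 : PySem.Set Int)
    (h : List.Nodup s0) :
    List.Nodup (rng.foldl (fun s c => if d.contains c then PySem.Set.add s (d.getD c 0) else s) s0) := by
  induction rng generalizing s0 with
  | nil => exact h
  | cons c rng ih =>
    simp only [List.foldl_cons]
    by_cases hc : d.contains c = true
    · rw [if_pos hc]; exact ih _ (PySem.Set.nodup_add _ _ h)
    · rw [if_neg hc]; exact ih _ h

-- lookups after inserting every index of range(a, b) with the same value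
theorem pvGetInsertRange (a b v : Int) (d : PySem.Dict Int Int) (c : Int) :
    ((PySem.List.pyRange a b 1).foldl (fun d i => d.insert i v) d).get? c =
      if a ≤ c ∧ c < b then some v else d.get? c := by
  by_cases hba : b ≤ a
  · rw [PySem.List.pyRange_one_eq_nil hba, List.foldl_nil, if_neg (by omega)]
  · obtain ⟨n, rfl⟩ : ∃ n : Nat, b = a + n := ⟨(b - a).toNat, by omega⟩
    clear hba
    induction n with
    | zero =>
      rw [show a + ((0:Nat):Int) = a by simp, PySem.List.pyRange_one_eq_nil (by omega),
        List.foldl_nil, if_neg (by omega)]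
    | succ n ih =>
      rw [show a + ((n+1:Nat):Int) = (a + n) + 1 by push_cast; ring,
        PySem.List.pyRange_one_succ_right (by omega), List.foldl_append,
        List.foldl_cons, List.foldl_nil, PySem.Dict.get?_insert, ih]
      split_ifs <;> first | rfl | omega

-- the char->token dict of A and the span list of B describe each other
def pvCorr (d : PySem.Dict Int Int) (spans : List (Int × Int)) : Prop :=
  ∀ c i : Int, (d.contains c = true ∧ d.getD c 0 = i) ↔
    ∃ k : Nat, ∃ _ : k < spans.length, i = k ∧ (spans[k]).1 ≤ c ∧ c < (spans[k]).2

theorem pvBuildCorr (t : List Char) (toks : List (List Char)) :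
    ∀ (cp : Int) (d : PySem.Dict Int Int) (acc : List (Int × Int)) (idx : Int),
      idx = acc.length → 0 ≤ cp → cp ≤ t.length →
      pvCorr d acc → (∀ c, d.contains c = true → c < cp) →
      pvCorr ((PySem.List.enumerate toks idx).foldl (pvCharMapStep t) (d, cp)).1
        (toks.foldl (pvSpanStep t) (acc, cp)).1 := by
  induction toks with
  | nil => intro cp d acc idx _ _ _ hcorr _; simpa [PySem.List.enumerate] using hcorr
  | cons token rest ih =>
    intro cp d acc idx hidx hcp0 hcpl hcorr hkeys
    rw [PySem.List.enumerate_cons, List.foldl_cons, List.foldl_cons]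
    by_cases hs : PySem.Chars.findFrom t token cp none = -1
    · have hA : pvCharMapStep t (d, cp) (idx, token) = (d, cp) := by
        simp [pvCharMapStep, hs]
      have hB : pvSpanStep t (acc, cp) token = (acc ++ [((-1 : Int), (-1 : Int))], cp) := by
        simp [pvSpanStep, hs]
      rw [hA, hB]
      refine ih cp d _ (idx + 1) (by simp [hidx]) hcp0 hcpl ?_ hkeys
      intro c i
      rw [hcorr c i]
      constructor
      · rintro ⟨k, hk, rfl, h1, h2⟩
        exact ⟨k, by simp; omega, rfl,
          by rwa [List.getElem_append_left hk], by rwa [List.getElem_append_left hk]⟩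
      · rintro ⟨k, hk, rfl, h1, h2⟩
        rcases Nat.lt_or_ge k acc.length with hlt | hge
        · exact ⟨k, hlt, rfl,
            by rwa [List.getElem_append_left hlt] at h1, by rwa [List.getElem_append_left hlt] at h2⟩
        · have hk' : k = acc.length := by
            rw [List.length_append, List.length_singleton] at hk; omega
          subst hk'
          simp only [List.getElem_concat_length] at h1 h2
          exact absurd h2 (by omega)
    · have hcpn : ((cp.toNat : Nat) : Int) = cp := Int.toNat_of_nonneg hcp0
      obtain ⟨hkle, hge, hfit⟩ := pvFindFrom_facts t token cp.toNat (by rwa [hcpn])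
      rw [hcpn] at hge hfit
      have hs0 : 0 ≤ PySem.Chars.findFrom t token cp none := le_trans hcp0 hge
      have hA : pvCharMapStep t (d, cp) (idx, token) =
          ((PySem.List.pyRange (PySem.Chars.findFrom t token cp none)
              (PySem.Chars.findFrom t token cp none + (token.length : Int)) 1).foldl
            (fun d i => d.insert i idx) d,
            PySem.Chars.findFrom t token cp none + (token.length : Int)) := by
        simp [pvCharMapStep, hs]
      have hB : pvSpanStep t (acc, cp) token =
          (acc ++ [(PySem.Chars.findFrom t token cp none,
              PySem.Chars.findFrom t token cp none + (token.length : Int))],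
            PySem.Chars.findFrom t token cp none + (token.length : Int)) := by
        simp [pvSpanStep, hs]
      rw [hA, hB]
      refine ih (PySem.Chars.findFrom t token cp none + (token.length : Int)) _ _ (idx + 1)
        (by rw [hidx, List.length_append, List.length_singleton]; push_cast; ring)
        (by omega) (by omega) ?_ ?_
      · intro c i
        have hget := pvGetInsertRange (PySem.Chars.findFrom t token cp none)
          (PySem.Chars.findFrom t token cp none + (token.length : Int)) idx d c
        rw [PySem.Dict.contains_eq_isSome_get?, PySem.Dict.getD_eq_get?_getD, hget]
        by_cases hin : PySem.Chars.findFrom t token cp none ≤ c ∧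
            c < PySem.Chars.findFrom t token cp none + (token.length : Int)
        · rw [if_pos hin]
          simp only [Option.isSome_some, Option.getD_some, true_and]
          constructor
          · rintro rfl
            refine ⟨acc.length, by simp, hidx, ?_, ?_⟩
            · simp only [List.getElem_concat_length]; exact hin.1
            · simp only [List.getElem_concat_length]; exact hin.2
          · rintro ⟨k, hk, rfl, h1, h2⟩
            rcases Nat.lt_or_ge k acc.length with hlt | hge'
            · rw [List.getElem_append_left hlt] at h1 h2
              have hdc : d.contains c = true ∧ d.getD c 0 = (k : Int) :=
                (hcorr c k).mpr ⟨k, hlt, rfl, h1, h2⟩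
              have := hkeys c hdc.1
              omega
            · have hk' : k = acc.length := by
                rw [List.length_append, List.length_singleton] at hk; omega
              subst hk'
              omega
        · rw [if_neg hin]
          rw [← PySem.Dict.contains_eq_isSome_get?, ← PySem.Dict.getD_eq_get?_getD]
          rw [hcorr c i]
          constructor
          · rintro ⟨k, hk, rfl, h1, h2⟩
            exact ⟨k, by simp; omega, rfl,
              by rwa [List.getElem_append_left hk], by rwa [List.getElem_append_left hk]⟩
          · rintro ⟨k, hk, rfl, h1, h2⟩
            rcases Nat.lt_or_ge k acc.length with hlt | hge'
            · exact ⟨k, hlt, rfl,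
                by rwa [List.getElem_append_left hlt] at h1,
                by rwa [List.getElem_append_left hlt] at h2⟩
            · have hk' : k = acc.length := by
                rw [List.length_append, List.length_singleton] at hk; omega
              subst hk'
              simp only [List.getElem_concat_length] at h1 h2
              exact absurd ⟨h1, h2⟩ hin
      · intro c hc
        have hget := pvGetInsertRange (PySem.Chars.findFrom t token cp none)
          (PySem.Chars.findFrom t token cp none + (token.length : Int)) idx d c
        rw [PySem.Dict.contains_eq_isSome_get?, hget] at hc
        by_cases hin : PySem.Chars.findFrom t token cp none ≤ c ∧
            c < PySem.Chars.findFrom t token cp none + (token.length : Int)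
        · omega
        · rw [if_neg hin, ← PySem.Dict.contains_eq_isSome_get?] at hc
          have := hkeys c hc
          omega

-- with corresponding dict and spans, A's sorted index set is B's covered list
theorem pvIndicesEq (d : PySem.Dict Int Int) (spans : List (Int × Int)) (h : pvCorr d spans)
    (pos endc : Int) : pvTokenIndices d pos endc = pvCovered spans pos endc := by
  unfold pvTokenIndices pvCovered
  have hpc : List.Pairwise (fun a b : Int => a < b)
      (((PySem.List.enumerate spans 0).filter
        (fun p => max p.2.1 pos < min p.2.2 endc)).map (·.1)) := by
    rw [List.pairwise_map]
    exact (PySem.List.pairwise_lt_enumerate spans 0).filter _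
  apply PySem.List.sorted_eq_of_perm_of_pairwise_lt
  · rw [List.perm_ext_iff_of_nodup (hpc.imp ne_of_lt)
      (pvNodupSetFold d _ PySem.Set.empty List.nodup_nil)]
    intro i
    rw [pvMemSetFold]
    simp only [List.mem_map, List.mem_filter, PySem.List.mem_enumerate_iff,
      PySem.List.mem_pyRange_one, decide_eq_true_eq]
    constructor
    · rintro ⟨p, ⟨⟨k, hk, rfl⟩, hpred⟩, hp1⟩
      refine Or.inr ⟨max (spans[k]).1 pos, ⟨le_max_right _ _, lt_of_lt_of_le hpred (min_le_right _ _)⟩, ?_⟩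
      have := (h (max (spans[k]).1 pos) i).mpr ⟨k, hk, by simpa using hp1.symm,
        le_max_left _ _, lt_of_lt_of_le hpred (min_le_left _ _)⟩
      exact this
    · rintro (hfalse | ⟨c, ⟨hc1, hc2⟩, hdc⟩)
      · exact absurd hfalse (List.not_mem_nil)
      · obtain ⟨k, hk, rfl, h1, h2⟩ := (h c i).mp hdc
        exact ⟨(0 + (k : Int), spans[k]), ⟨⟨k, hk, rfl⟩, by simp; omega⟩, by simp⟩
  · exact hpc

-- A's fold over the precomputed occurrence list is B's tagging while-loop
theorem pvOccLoopEq (t c : List Char) (d : PySem.Dict Int Int) (spans : List (Int × Int))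
    (h : pvCorr d spans) (label : String) :
    ∀ (start : Nat) (labels : List String),
      (pvFindAllOccAux t c start).foldl
          (fun labels occ => pvApplyBIO label labels (pvTokenIndices d occ.1 occ.2)) labels =
        pvTagOccs t c spans label labels start := by
  have key : ∀ (n : Nat) (start : Nat) (labels : List String), t.length + 1 - start ≤ n →
      (pvFindAllOccAux t c start).foldl
          (fun labels occ => pvApplyBIO label labels (pvTokenIndices d occ.1 occ.2)) labels =
        pvTagOccs t c spans label labels start := by
    intro n
    induction n with
    | zero =>
      intro start labels hle
      rw [pvFindAllOccAux, pvTagOccs]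
      have hf := pvFindFrom_neg_one_of_gt t c start (by omega)
      simp [hf]
    | succ n ih =>
      intro start labels hle
      rw [pvFindAllOccAux, pvTagOccs]
      by_cases hf : PySem.Chars.findFrom t c (start : Int) none = -1
      · simp [hf]
      · obtain ⟨f1, f2, f3⟩ := pvFindFrom_facts t c start hf
        have hnn : 0 ≤ PySem.Chars.findFrom t c (start : Int) none :=
          le_trans (Int.natCast_nonneg start) f2
        have htn := Int.toNat_of_nonneg hnn
        rw [dif_neg hf, dif_neg hf, List.foldl_cons]
        rw [pvIndicesEq d spans h]
        exact ih _ _ (by omega)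
  intro start labels
  exact key (t.length + 1 - start) start labels le_rfl

-- ===== VERDICT (by name: the statement is the Claim_ definition above) =====
theorem convert_chunks_to_conll_spec : Claim_equal_convert_chunks_to_conll := by
  intro text labeled_chunks _
  unfold Spec_convert_chunks_to_conll convert_chunks_to_conll convert_chunks_to_conll_alt
    find_all_occurrences
  dsimp only
  have hcorr : pvCorr
      ((PySem.List.enumerate (PySem.Chars.split₀ text.toList) 0).foldl
        (pvCharMapStep text.toList) (PySem.Dict.empty, 0)).1
      ((PySem.Chars.split₀ text.toList).foldl (pvSpanStep text.toList) ([], 0)).1 := by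
    apply pvBuildCorr text.toList (PySem.Chars.split₀ text.toList) 0 PySem.Dict.empty [] 0
      (by simp) le_rfl (Int.natCast_nonneg _)
    · intro c i
      constructor
      · rintro ⟨hc, -⟩
        rw [PySem.Dict.contains_empty] at hc
        exact absurd hc (by simp)
      · rintro ⟨k, hk, -⟩
        exact absurd hk (by simp)
    · intro c hc
      rw [PySem.Dict.contains_empty] at hc
      exact absurd hc (by simp)
  congr 1
  congr 1
  funext labels lc
  congr 1
  funext labels chunk
  exact pvOccLoopEq text.toList chunk.toList _ _ hcorr lc.1 0 labels
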